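-- pv_equiv track=rewrite | github.com/takumi-motty/python_files | personal_classification.py | getFixations
-- ===== SOURCE A (Python) =====
-- fixation_width = 5
--
-- def getFixations(listxy, label):
--     fixation = []
--     fixations_list = []
--     for i in range(len(listxy)):
--         if label[i] == 1:
--             fixation.append(listxy[i])
--         else:
--             # if(fixation != []):
--                 # 注視点候補箇所の幅が閾値以上だったら
--             if len(fixation) >= fixation_width:
--                 fixations_list.append(fixation)
--             fixation = []
--     if(fixation != []):
--         fixations_list.append(fixation)
--         fixation = []
--
--     return fixations_list
-- ===== SOURCE B (Python) =====
-- fixation_width = 5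
--
-- def getFixations(listxy, label):
--     # Two-pointer scan: find each maximal run of label==1 with an inner pointer,
--     # slice it out of listxy, and keep it only if it is wide enough.
--     fixations_list = []
--     n = len(listxy)
--     i = 0
--     while i < n:
--         if label[i] == 1:
--             j = i + 1
--             while j < n and label[j] == 1:
--                 j += 1
--             if j - i >= fixation_width:
--                 fixations_list.append(listxy[i:j])
--             i = j
--         else:
--             i += 1
--     return fixations_list
-- ===== Notes on version B (the rewrite author's own statement) =====
-- stated objective: alternative
-- what changed: Replaces A's per-element accumulator-and-flush state machine with a two-pointer scan that finds each maximal run of label==1 and slices it out of listxy, applying the width threshold uniformly to every run including the last.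
-- intended difference: When label (restricted to the first len(listxy) entries) ends in a run of 1s shorter than fixation_width, A appends that short trailing run anyway (its final flush forgets the width check) while B omits it; applying the threshold to every run is the evident intent. — e.g. on getFixations([(7, 8)], [1]): A returns [[(7, 8)]], B returns []
import Mathlib
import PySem

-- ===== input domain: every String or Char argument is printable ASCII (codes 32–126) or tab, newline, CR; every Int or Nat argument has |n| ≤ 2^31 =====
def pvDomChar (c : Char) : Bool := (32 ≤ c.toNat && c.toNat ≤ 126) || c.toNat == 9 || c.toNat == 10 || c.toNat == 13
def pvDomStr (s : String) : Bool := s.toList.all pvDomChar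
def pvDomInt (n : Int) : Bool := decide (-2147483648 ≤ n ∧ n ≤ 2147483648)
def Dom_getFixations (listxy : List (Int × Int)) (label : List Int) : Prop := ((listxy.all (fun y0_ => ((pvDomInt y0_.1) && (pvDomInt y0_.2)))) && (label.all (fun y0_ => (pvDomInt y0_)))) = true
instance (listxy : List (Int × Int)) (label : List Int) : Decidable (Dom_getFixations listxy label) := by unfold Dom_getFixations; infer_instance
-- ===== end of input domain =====

-- B replaces A's accumulator-and-flush state machine by a two-pointer scan over maximal label==1
-- runs (slicing listxy); it applies the width threshold uniformly, also to the trailing run, where A omits it (see D_).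


-- ===== PORT A =====
-- literal transliteration of A: fold over range(len(listxy)) carrying (fixation, fixations_list),
-- then the final flush 'if fixation != []' (no width check there, exactly as in A).
def getFixations (listxy : List (Int × Int)) (label : List Int) : List (List (Int × Int)) :=
  let st := (PySem.List.pyRange 0 (PySem.List.len listxy) 1).foldl
    (fun (st : List (Int × Int) × List (List (Int × Int))) i =>
      if PySem.List.pyGetD label i 0 = 1 then
        (st.1 ++ [PySem.List.pyGetD listxy i (0, 0)], st.2)
      else
        (([] : List (Int × Int)), if 5 ≤ st.1.length then st.2 ++ [st.1] else st.2))
    ([], [])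
  if st.1 ≠ [] then st.2 ++ [st.1] else st.2

-- ===== PORT B =====
-- B's inner while loop 'while j < n and label[j] == 1: j += 1' (fuel n - j only makes the loop total)
def altInnerGo (label : List Int) (n : Nat) : Nat → Nat → Nat
  | 0, j => j
  | fuel + 1, j =>
      if j < n ∧ PySem.List.pyGetD label (j : Int) 0 = 1 then altInnerGo label n fuel (j + 1) else j

-- B's outer while loop (fuel n - i only makes the loop total)
def altLoopGo (listxy : List (Int × Int)) (label : List Int) (n : Nat) :
    Nat → Nat → List (List (Int × Int)) → List (List (Int × Int))
  | 0, _, acc => acc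
  | fuel + 1, i, acc =>
      if i < n then
        if PySem.List.pyGetD label (i : Int) 0 = 1 then
          let j := altInnerGo label n (n - (i + 1)) (i + 1)
          let acc' := if 5 ≤ j - i then
              acc ++ [PySem.List.slice listxy (some (i : Int)) (some (j : Int))] else acc
          altLoopGo listxy label n fuel j acc'
        else altLoopGo listxy label n fuel (i + 1) acc
      else acc

def getFixations_alt (listxy : List (Int × Int)) (label : List Int) : List (List (Int × Int)) :=
  altLoopGo listxy label listxy.length listxy.length 0 []

-- ===== PRECONDITION & SPEC =====
-- Pre_ excludes exactly the inputs where A raises IndexError (label shorter than listxy); B raises there too.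
def Pre_getFixations (listxy : List (Int × Int)) (label : List Int) : Prop :=
  listxy.length ≤ label.length
instance (listxy : List (Int × Int)) (label : List Int) : Decidable (Pre_getFixations listxy label) := by
  unfold Pre_getFixations; infer_instance
def pvWitness_getFixations : (List (Int × Int)) × List Int := ([(0, 0), (1, 1)], [1, 0])

-- When label (restricted to the first len(listxy) entries) ends in a run of 1s shorter than
-- fixation_width, A appends that short trailing run anyway (its final flush forgets the width
-- check) while B omits it; applying the threshold to every run is the evident intent.
def D_getFixations (listxy : List (Int × Int)) (label : List Int) : Prop :=
  0 < (((label.take listxy.length).reverse).takeWhile (fun l => l == 1)).length ∧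
  (((label.take listxy.length).reverse).takeWhile (fun l => l == 1)).length < 5
instance (listxy : List (Int × Int)) (label : List Int) : Decidable (D_getFixations listxy label) := by
  unfold D_getFixations; infer_instance

def Spec_getFixations (listxy : List (Int × Int)) (label : List Int) (out : List (List (Int × Int))) : Prop := ¬ D_getFixations listxy label → out = getFixations_alt listxy label
instance (listxy : List (Int × Int)) (label : List Int) (out : List (List (Int × Int))) : Decidable (Spec_getFixations listxy label out) := by unfold Spec_getFixations; infer_instance

def pvDiffWitness_getFixations : (List (Int × Int)) × List Int := ([(7, 8)], [1])
def pvDiffWitnessOut_getFixations : (List (List (Int × Int))) × (List (List (Int × Int))) := ([[(7, 8)]], [])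

-- ===== CLAIM (what is proved, stated in full; the proofs are below) =====
def Claim_unchanged_getFixations : Prop := ∀ (listxy : List (Int × Int)) (label : List Int), Dom_getFixations listxy label → Pre_getFixations listxy label → Spec_getFixations listxy label (getFixations listxy label)
def Claim_changed_getFixations : Prop := Dom_getFixations (pvDiffWitness_getFixations.1) (pvDiffWitness_getFixations.2) ∧ Pre_getFixations (pvDiffWitness_getFixations.1) (pvDiffWitness_getFixations.2) ∧ D_getFixations (pvDiffWitness_getFixations.1) (pvDiffWitness_getFixations.2) ∧ getFixations (pvDiffWitness_getFixations.1) (pvDiffWitness_getFixations.2) = pvDiffWitnessOut_getFixations.1 ∧ getFixations_alt (pvDiffWitness_getFixations.1) (pvDiffWitness_getFixations.2) = pvDiffWitnessOut_getFixations.2 ∧ pvDiffWitnessOut_getFixations.1 ≠ pvDiffWitnessOut_getFixations.2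
def Claim_exact_getFixations : Prop := ∀ (listxy : List (Int × Int)) (label : List Int), Dom_getFixations listxy label → Pre_getFixations listxy label → D_getFixations listxy label → getFixations listxy label ≠ getFixations_alt listxy label

-- ===== LEMMAS AND PROOFS =====

-- A's runs, element-wise over the zipped list (last run flushed without width check, as A does)
def runsA : List ((Int × Int) × Int) → List (Int × Int) → List (List (Int × Int))
  | [], cur => if cur ≠ [] then [cur] else []
  | p :: t, cur =>
      if p.2 = 1 then runsA t (cur ++ [p.1])
      else (if 5 ≤ cur.length then [cur] else []) ++ runsA t []

-- B's runs: same, but the width check also applies to the final run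
def runsB : List ((Int × Int) × Int) → List (Int × Int) → List (List (Int × Int))
  | [], cur => if 5 ≤ cur.length then [cur] else []
  | p :: t, cur =>
      if p.2 = 1 then runsB t (cur ++ [p.1])
      else (if 5 ≤ cur.length then [cur] else []) ++ runsB t []

-- running length of the current trailing run of 1s
def tl : List Int → Nat → Nat
  | [], c => c
  | l :: t, c => tl t (if l = 1 then c + 1 else 0)

theorem tl_append (ls : List Int) (l : Int) : ∀ c, tl (ls ++ [l]) c = if l = 1 then tl ls c + 1 else 0 := by
  induction ls with
  | nil => intro c; simp [tl]
  | cons a t ih => intro c; simp [tl, ih]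

theorem tl_eq_trail (ls : List Int) : tl ls 0 = ((ls.reverse).takeWhile (fun l => l == 1)).length := by
  induction ls using List.reverseRecOn with
  | nil => simp [tl]
  | append_singleton t l ih =>
      rw [tl_append]
      by_cases h : l = 1 <;> simp [h, ih]

-- bridge: A's index fold = fold over the zipped list
theorem foldl_range_zip {St : Type} (g : St → Int → (Int × Int) → St) :
    ∀ (xs : List (Int × Int)) (ys : List Int) (init : St), xs.length ≤ ys.length →
    (PySem.List.pyRange 0 (xs.length : Int) 1).foldl
      (fun st i => g st (PySem.List.pyGetD ys i 0) (PySem.List.pyGetD xs i (0, 0))) init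
    = (xs.zip ys).foldl (fun st p => g st p.2 p.1) init := by
  have core : ∀ (xs : List (Int × Int)) (ys : List Int) (init : St), xs.length ≤ ys.length →
      (List.range xs.length).foldl
        (fun st k => g st (ys.getD k 0) (xs.getD k (0, 0))) init
      = (xs.zip ys).foldl (fun st p => g st p.2 p.1) init := by
    intro xs
    induction xs with
    | nil => intro ys init h; simp
    | cons x t ih =>
        intro ys init h
        match ys with
        | [] => simp at h
        | y :: ys' =>
            simp only [List.length_cons, List.range_succ_eq_map]
            simp only [List.foldl_cons, List.foldl_map, List.getD_cons_zero, List.getD_cons_succ,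
              List.zip_cons_cons]
            exact ih ys' (g init y x) (by simpa using h)
  intro xs ys init h
  rw [PySem.List.pyRange_one]
  simp only [List.foldl_map, Int.sub_zero, Int.toNat_natCast, zero_add,
    PySem.List.pyGetD_natCast]
  exact core xs ys init h

theorem flush_fold_runsA : ∀ (L : List ((Int × Int) × Int)) (cur : List (Int × Int))
    (out : List (List (Int × Int))),
    (fun st : List (Int × Int) × List (List (Int × Int)) =>
        if st.1 ≠ [] then st.2 ++ [st.1] else st.2)
      (L.foldl (fun st p =>
          if p.2 = 1 then (st.1 ++ [p.1], st.2)
          else (([] : List (Int × Int)), if 5 ≤ st.1.length then st.2 ++ [st.1] else st.2))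
        (cur, out))
    = out ++ runsA L cur := by
  intro L
  induction L with
  | nil =>
      intro cur out
      by_cases h : cur = [] <;> simp [runsA, h]
  | cons p t ih =>
      intro cur out
      by_cases h : p.2 = 1
      · simp only [List.foldl_cons, h, runsA]
        simp [ih]
      · simp only [List.foldl_cons, h, runsA]
        by_cases h5 : 5 ≤ cur.length <;> simp [h5, ih]

theorem runsA_eq_runsB : ∀ (L : List ((Int × Int) × Int)) (cur : List (Int × Int)),
    (tl (L.map Prod.snd) cur.length = 0 ∨ 5 ≤ tl (L.map Prod.snd) cur.length) →
    runsA L cur = runsB L cur := by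
  intro L
  induction L with
  | nil =>
      intro cur h
      simp only [List.map_nil, tl] at h
      rcases h with h | h
      · simp [runsA, runsB, List.length_eq_zero_iff.mp h]
      · have hne : cur ≠ [] := by
          intro he; rw [he] at h; simp at h
        simp [runsA, runsB, hne, h]
  | cons p t ih =>
      intro cur h
      simp only [List.map_cons, tl] at h
      by_cases hp : p.2 = 1
      · simp only [runsA, runsB, if_pos hp]
        apply ih
        simpa [hp] using h
      · simp only [runsA, runsB, if_neg hp]
        rw [ih [] (by simpa [hp] using h)]

theorem runsA_len : ∀ (L : List ((Int × Int) × Int)) (cur : List (Int × Int)),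
    (tl (L.map Prod.snd) cur.length ≠ 0 ∧ tl (L.map Prod.snd) cur.length < 5) →
    (runsA L cur).length = (runsB L cur).length + 1 := by
  intro L
  induction L with
  | nil =>
      intro cur h
      simp only [List.map_nil, tl] at h
      have hne : cur ≠ [] := by
        intro he; rw [he] at h; simp at h
      have h5 : ¬ 5 ≤ cur.length := by omega
      simp [runsA, runsB, hne, h5]
  | cons p t ih =>
      intro cur h
      simp only [List.map_cons, tl] at h
      by_cases hp : p.2 = 1
      · simp only [runsA, runsB, if_pos hp]
        apply ih
        simpa [hp] using h
      · simp only [runsA, runsB, if_neg hp]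
        rw [List.length_append, List.length_append, ih [] (by simpa [hp] using h)]
        omega

theorem inner_ge (label : List Int) (n : Nat) :
    ∀ fuel j, j ≤ altInnerGo label n fuel j := by
  intro fuel
  induction fuel with
  | zero => intro j; simp [altInnerGo]
  | succ f ih =>
      intro j
      simp only [altInnerGo]
      split
      · exact le_trans (Nat.le_succ j) (ih (j + 1))
      · exact le_refl j

theorem inner_le (label : List Int) (n : Nat) :
    ∀ fuel j, j ≤ n → altInnerGo label n fuel j ≤ n := by
  intro fuel
  induction fuel with
  | zero => intro j h; simpa [altInnerGo] using h
  | succ f ih =>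
      intro j h
      simp only [altInnerGo]
      split
      · next hc => exact ih (j + 1) hc.1
      · exact h

theorem inner_ones (label : List Int) (n : Nat) :
    ∀ fuel j m, j ≤ m → m < altInnerGo label n fuel j → label.getD m 0 = 1 := by
  intro fuel
  induction fuel with
  | zero => intro j m h1 h2; simp [altInnerGo] at h2; omega
  | succ f ih =>
      intro j m h1 h2
      simp only [altInnerGo] at h2
      split at h2
      · next hc =>
          rcases Nat.eq_or_lt_of_le h1 with rfl | hlt
          · simpa using hc.2
          · exact ih (j + 1) m hlt h2
      · omega

theorem inner_stop (label : List Int) (n : Nat) :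
    ∀ fuel j, n - j ≤ fuel → altInnerGo label n fuel j < n →
    ¬ label.getD (altInnerGo label n fuel j) 0 = 1 := by
  intro fuel
  induction fuel with
  | zero =>
      intro j h1 h2
      simp only [altInnerGo] at h2 ⊢
      omega
  | succ f ih =>
      intro j h1 h2
      simp only [altInnerGo] at h2 ⊢
      split at h2
      · next hc =>
          rw [if_pos hc]
          exact ih (j + 1) (by omega) h2
      · next hc =>
          rw [if_neg hc]
          intro hl
          exact hc ⟨h2, by simpa using hl⟩

-- one maximal all-1 block followed by a rest that does not start with 1
theorem runsB_run : ∀ (R rest : List ((Int × Int) × Int)) (cur : List (Int × Int)),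
    (∀ p ∈ R, p.2 = 1) → (∀ q t, rest = q :: t → q.2 ≠ 1) →
    runsB (R ++ rest) cur
      = (if 5 ≤ (cur ++ R.map Prod.fst).length then [cur ++ R.map Prod.fst] else [])
        ++ runsB rest [] := by
  intro R
  induction R with
  | nil =>
      intro rest cur _ hrest
      match rest with
      | [] => simp [runsB]
      | q :: t =>
          have hq : ¬ q.2 = 1 := hrest q t rfl
          simp [runsB, hq]
  | cons p R' ih =>
      intro rest cur hall hrest
      have hp : p.2 = 1 := hall p (by simp)
      simp only [List.cons_append, runsB, if_pos hp]
      rw [ih rest (cur ++ [p.1]) (fun x hx => hall x (by simp [hx])) hrest]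
      simp

theorem altLoop_eq (listxy : List (Int × Int)) (label : List Int)
    (hPre : listxy.length ≤ label.length) :
    ∀ fuel i acc, listxy.length - i ≤ fuel →
    altLoopGo listxy label listxy.length fuel i acc
      = acc ++ runsB ((listxy.zip label).drop i) [] := by
  have hLlen : (listxy.zip label).length = listxy.length := by
    simp [List.length_zip]; omega
  intro fuel
  induction fuel with
  | zero =>
      intro i acc h
      have : (listxy.zip label).drop i = [] := by
        apply List.drop_eq_nil_of_le; omega
      simp [altLoopGo, this, runsB]
  | succ f ih =>
      intro i acc h
      simp only [altLoopGo]
      by_cases hi : i < listxy.length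
      · rw [if_pos hi]
        have hiL : i < (listxy.zip label).length := by omega
        have hdropi := List.drop_eq_getElem_cons hiL
        have hgetD : PySem.List.pyGetD label (i : Int) 0 = label.getD i 0 := by
          simp
        by_cases h1 : PySem.List.pyGetD label (i : Int) 0 = 1
        · rw [if_pos h1]
          have hl1 : label[i]'(by omega) = 1 := by
            rw [hgetD, List.getD_eq_getElem _ _ (by omega)] at h1; exact h1
          set j := altInnerGo label listxy.length (listxy.length - (i + 1)) (i + 1) with hj
          have hj1 : i + 1 ≤ j := inner_ge label listxy.length _ (i + 1)
          have hj2 : j ≤ listxy.length := inner_le label listxy.length _ (i + 1) (by omega)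
          have hones : ∀ m, i + 1 ≤ m → m < j → label.getD m 0 = 1 := by
            intro m hm1 hm2; exact inner_ones label listxy.length _ (i + 1) m hm1 hm2
          have hstop : j < listxy.length → ¬ label.getD j 0 = 1 :=
            inner_stop label listxy.length _ (i + 1) (by omega)
          set L := listxy.zip label with hL
          set R := (L.drop i).take (j - i) with hR
          have hRlen : R.length = j - i := by
            rw [hR]; rw [List.length_take, List.length_drop]; omega
          have hdecomp : L.drop i = R ++ L.drop j := by
            rw [hR]
            conv_lhs => rw [← List.take_append_drop (j - i) (L.drop i)]
            congr 1
            rw [List.drop_drop]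
            congr 1; omega
          have hallR : ∀ p ∈ R, p.2 = 1 := by
            intro p hp
            rw [List.mem_iff_getElem] at hp
            obtain ⟨k, hk, hpk⟩ := hp
            have hk' : k < j - i := by rw [hRlen] at hk; exact hk
            subst hpk
            simp only [hR, hL, List.getElem_take, List.getElem_drop, List.getElem_zip]
            rcases Nat.eq_zero_or_pos k with rfl | hk0
            · simpa using hl1
            · have := hones (i + k) (by omega) (by omega)
              rw [List.getD_eq_getElem _ _ (by omega)] at this
              simpa using this
          have hrest : ∀ q t, L.drop j = q :: t → q.2 ≠ 1 := by
            intro q t hqt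
            have hjL : j < L.length := by
              by_contra hc
              rw [List.drop_eq_nil_of_le (by omega)] at hqt
              simp at hqt
            have := List.drop_eq_getElem_cons hjL
            rw [hqt] at this
            injection this with h1' h2'
            have hq : q = L[j]'hjL := h1'.symm ▸ rfl
            rw [hq, List.getElem_zip]
            have := hstop (by omega)
            rw [List.getD_eq_getElem _ _ (by omega)] at this
            simpa using this
          have hmapR : R.map Prod.fst = (listxy.drop i).take (j - i) := by
            rw [hR, hL, List.map_take, List.map_drop, List.map_fst_zip hPre]
          have hslice : PySem.List.slice listxy (some (i : Int)) (some (j : Int))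
              = R.map Prod.fst := by
            rw [hmapR, PySem.List.slice_natCast]
          rw [ih j _ (by omega)]
          rw [hdecomp, runsB_run R (L.drop j) [] hallR hrest]
          simp only [List.nil_append, hslice, hRlen, List.length_map]
          by_cases h5 : 5 ≤ j - i <;> simp [h5]
        · rw [if_neg h1]
          rw [ih (i + 1) acc (by omega)]
          rw [hdropi]
          have hq1 : ¬ ((listxy.zip label)[i]'hiL).2 = 1 := by
            simp only [List.getElem_zip]
            rw [hgetD, List.getD_eq_getElem _ _ (by omega)] at h1
            simpa using h1
          simp only [runsB, if_neg hq1]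
          simp
      · rw [if_neg hi]
        have : (listxy.zip label).drop i = [] := by
          apply List.drop_eq_nil_of_le; omega
        simp [this, runsB]

theorem zip_map_snd_take (xs : List (Int × Int)) (ys : List Int) (h : xs.length ≤ ys.length) :
    (xs.zip ys).map Prod.snd = ys.take xs.length := by
  induction xs generalizing ys with
  | nil => simp
  | cons x t ih =>
      match ys with
      | [] => simp at h
      | y :: ys' => simp [ih ys' (by simpa using h)]

theorem getFixations_eq_runsA (listxy : List (Int × Int)) (label : List Int)
    (hPre : listxy.length ≤ label.length) :
    getFixations listxy label = runsA (listxy.zip label) [] := by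
  show (fun st : List (Int × Int) × List (List (Int × Int)) =>
      if st.1 ≠ [] then st.2 ++ [st.1] else st.2)
    ((PySem.List.pyRange 0 (PySem.List.len listxy) 1).foldl
      (fun st i =>
        if PySem.List.pyGetD label i 0 = 1 then
          (st.1 ++ [PySem.List.pyGetD listxy i (0, 0)], st.2)
        else
          (([] : List (Int × Int)), if 5 ≤ st.1.length then st.2 ++ [st.1] else st.2))
      ([], [])) = runsA (listxy.zip label) []
  rw [PySem.List.len_eq,
    foldl_range_zip
      (fun st l xy =>
        if l = 1 then (st.1 ++ [xy], st.2)
        else (([] : List (Int × Int)), if 5 ≤ st.1.length then st.2 ++ [st.1] else st.2))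
      listxy label ([], []) hPre]
  simpa using flush_fold_runsA (listxy.zip label) [] []

theorem alt_eq_runsB (listxy : List (Int × Int)) (label : List Int)
    (hPre : listxy.length ≤ label.length) :
    getFixations_alt listxy label = runsB (listxy.zip label) [] := by
  show altLoopGo listxy label listxy.length listxy.length 0 [] = runsB (listxy.zip label) []
  rw [altLoop_eq listxy label hPre listxy.length 0 [] (by omega)]
  simp

theorem trail_tl (listxy : List (Int × Int)) (label : List Int)
    (hPre : listxy.length ≤ label.length) :
    tl (((listxy.zip label).map Prod.snd)) 0
      = (((label.take listxy.length).reverse).takeWhile (fun l => l == 1)).length := by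
  rw [zip_map_snd_take listxy label hPre, tl_eq_trail]

-- ===== VERDICT (by name: the statement is the Claim_ definition above) =====
theorem getFixations_spec : Claim_unchanged_getFixations := by
  intro listxy label _hDom hPre
  unfold Spec_getFixations
  intro hD
  rw [getFixations_eq_runsA listxy label hPre, alt_eq_runsB listxy label hPre]
  apply runsA_eq_runsB
  have htl := trail_tl listxy label hPre
  unfold D_getFixations at hD
  simp only [List.length_nil]
  omega

theorem getFixations_changed : Claim_changed_getFixations := by
  unfold Claim_changed_getFixations; decide

theorem getFixations_tight : Claim_exact_getFixations := by
  intro listxy label _hDom hPre hD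
  rw [getFixations_eq_runsA listxy label hPre, alt_eq_runsB listxy label hPre]
  intro heq
  have htl := trail_tl listxy label hPre
  unfold D_getFixations at hD
  have hlen := runsA_len (listxy.zip label) [] (by simp only [List.length_nil]; omega)
  rw [heq] at hlen
  omega
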